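-- pv_equiv track=rewrite | github.com/leandrofirmacion/pokemon-battle-architect | app.py | ledger_column_order
-- ===== SOURCE A (Python) =====
-- def ledger_column_order(columns: list[str]) -> list[str]:
--     """
--     Leading columns: PokéAPI id, name, art (image_url), types, Moveset; then the rest in source order.
--     """
--     cols_list = list(columns)
--     colset = set(cols_list)
--     preferred = ("pokeapi_id", "name", "image_url", "types", "Moveset")
--     ordered: list[str] = []
--     for p in preferred:
--         if p in colset:
--             ordered.append(p)
--     for c in cols_list:
--         if c not in ordered:
--             ordered.append(c)
--     return ordered
-- ===== SOURCE B (Python) =====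
-- def ledger_column_order(columns: list[str]) -> list[str]:
--     """
--     Leading columns: PokéAPI id, name, art (image_url), types, Moveset; then the rest in source order.
--     Bucket (counting-sort) strategy: one pass over the columns, placing each first
--     occurrence into the bucket of its preferred rank (rank 5 = not preferred), then
--     concatenating the buckets.
--     """
--     preferred = ("pokeapi_id", "name", "image_url", "types", "Moveset")
--     rank = {p: i for i, p in enumerate(preferred)}
--     n = len(preferred)
--     buckets = [[] for _ in range(n + 1)]
--     seen = set()
--     for c in columns:
--         if c not in seen:
--             seen.add(c)
--             buckets[rank.get(c, n)].append(c)
--     return [c for b in buckets for c in b]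
-- ===== Notes on version B (the rewrite author's own statement) =====
-- stated objective: faster
-- what changed: Replaces A's two scans (preferred names against a set, then the source list with a membership test against the growing output list) by a single pass that counting-sorts the first occurrence of each column into rank buckets (rank = index in preferred, else 5) and concatenates the buckets.
import Mathlib
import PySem

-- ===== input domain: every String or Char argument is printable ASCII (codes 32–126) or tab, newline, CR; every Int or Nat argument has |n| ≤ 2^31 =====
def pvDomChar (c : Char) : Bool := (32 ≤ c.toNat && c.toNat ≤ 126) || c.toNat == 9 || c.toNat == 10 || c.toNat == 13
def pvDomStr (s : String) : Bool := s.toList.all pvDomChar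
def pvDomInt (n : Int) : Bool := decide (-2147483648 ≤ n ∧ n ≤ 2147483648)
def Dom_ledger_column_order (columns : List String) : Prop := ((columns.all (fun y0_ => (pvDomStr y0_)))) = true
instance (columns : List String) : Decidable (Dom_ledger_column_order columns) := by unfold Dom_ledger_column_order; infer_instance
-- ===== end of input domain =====

-- B replaces A's two scans (quadratic membership test in the growing output) by one counting-sort pass into rank buckets with a seen set; same return value, measured faster.

-- ===== PORT A =====
-- the literal tuple `preferred` shared by both programs
def pvPreferred : List String := ["pokeapi_id", "name", "image_url", "types", "Moveset"]

-- body of A's second loop: `if c not in ordered: ordered.append(c)`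
def pvStepA (ordered : List String) (c : String) : List String :=
  if ordered.contains c then ordered else ordered ++ [c]

def ledger_column_order (columns : List String) : List String :=
  let cols_list := columns
  let colset : PySem.Set String := PySem.Set.ofList cols_list
  let ordered : List String :=
    pvPreferred.foldl (fun ordered p => if colset.contains p then ordered ++ [p] else ordered) []
  cols_list.foldl pvStepA ordered

-- ===== PORT B =====
-- rank = {p: i for i, p in enumerate(preferred)}
def pvRankDict : PySem.Dict String Int :=
  (PySem.List.enumerate pvPreferred).foldl (fun d ip => d.insert ip.2 ip.1) PySem.Dict.empty

-- body of B's loop: first occurrence of c goes into buckets[rank.get(c, n)]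
def pvStepB (st : List (List String) × PySem.Set String) (c : String) :
    List (List String) × PySem.Set String :=
  if st.2.contains c then st
  else
    let i := (pvRankDict.getD c (pvPreferred.length : Int)).toNat
    (st.1.set i ((st.1.getD i []) ++ [c]), st.2.add c)

def ledger_column_order_alt (columns : List String) : List String :=
  let n := pvPreferred.length
  let final := columns.foldl pvStepB (List.replicate (n + 1) ([] : List String), PySem.Set.ofList [])
  final.1.flatten

-- ===== PRECONDITION & SPEC =====
def Spec_ledger_column_order (columns : List String) (out : List String) : Prop := out = ledger_column_order_alt columns
instance (columns : List String) (out : List String) : Decidable (Spec_ledger_column_order columns out) := by unfold Spec_ledger_column_order; infer_instance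

-- ===== CLAIM (what is proved, stated in full; the proofs are below) =====
def Claim_equal_ledger_column_order : Prop := ∀ (columns : List String), Dom_ledger_column_order columns → Spec_ledger_column_order columns (ledger_column_order columns)

-- ===== LEMMAS AND PROOFS =====

-- rank.get(c, 5) as a plain function on strings
def pvRank (c : String) : Nat :=
  if c = "pokeapi_id" then 0 else if c = "name" then 1 else if c = "image_url" then 2
  else if c = "types" then 3 else if c = "Moveset" then 4 else 5

theorem pvRank_eval (c : String) :
    (pvRankDict.getD c (pvPreferred.length : Int)).toNat = pvRank c := by
  simp only [pvRankDict, pvPreferred, PySem.List.enumerate_cons, PySem.List.enumerate_nil,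
    List.foldl_cons, List.foldl_nil, PySem.Dict.getD_insert, PySem.Dict.getD_empty, pvRank]
  split_ifs <;> simp_all

-- the stream of first occurrences of cs relative to an already-seen set t
def pvDS (cs : List String) (t : PySem.Set String) : List String :=
  match cs with
  | [] => []
  | c :: cs => if t.contains c then pvDS cs t else c :: pvDS cs (t.add c)

-- A's second loop appends exactly the not-yet-present elements, in order
def pvNewA (cs : List String) (s : List String) : List String :=
  match cs with
  | [] => []
  | c :: cs => if s.contains c then pvNewA cs s else c :: pvNewA cs (s ++ [c])

theorem A_loop (cs : List String) : ∀ s : List String,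
    cs.foldl pvStepA s = s ++ pvNewA cs s := by
  induction cs with
  | nil => intro s; simp [pvNewA]
  | cons c cs ih =>
    intro s
    by_cases h : c ∈ s
    · simp [pvStepA, pvNewA, List.contains_eq_mem, h, ih]
    · simp [pvStepA, pvNewA, List.contains_eq_mem, h, ih (s ++ [c])]

-- B's loop, in closed form: each bucket collects the first occurrences of its rank
theorem B_loop (cs : List String) : ∀ (t : PySem.Set String) (b0 b1 b2 b3 b4 b5 : List String),
    (cs.foldl pvStepB ([b0, b1, b2, b3, b4, b5], t)).1 =
      [b0 ++ (pvDS cs t).filter (fun c => pvRank c == 0),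
       b1 ++ (pvDS cs t).filter (fun c => pvRank c == 1),
       b2 ++ (pvDS cs t).filter (fun c => pvRank c == 2),
       b3 ++ (pvDS cs t).filter (fun c => pvRank c == 3),
       b4 ++ (pvDS cs t).filter (fun c => pvRank c == 4),
       b5 ++ (pvDS cs t).filter (fun c => pvRank c == 5)] := by
  induction cs with
  | nil => intro t b0 b1 b2 b3 b4 b5; simp [pvDS]
  | cons c cs ih =>
    intro t b0 b1 b2 b3 b4 b5
    by_cases h : t.contains c
    · simp only [List.foldl_cons, pvStepB, h, if_true, pvDS]
      exact ih t b0 b1 b2 b3 b4 b5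
    · simp only [List.foldl_cons, pvStepB, h, if_false, Bool.false_eq_true, pvDS, pvRank_eval]
      unfold pvRank
      split_ifs with h0 h1 h2 h3 h4
      · subst h0; simp [List.set, List.getD, ih, List.filter_cons, pvRank, List.append_assoc]
      · subst h1; simp [List.set, List.getD, ih, List.filter_cons, pvRank, List.append_assoc]
      · subst h2; simp [List.set, List.getD, ih, List.filter_cons, pvRank, List.append_assoc]
      · subst h3; simp [List.set, List.getD, ih, List.filter_cons, pvRank, List.append_assoc]
      · subst h4; simp [List.set, List.getD, ih, List.filter_cons, pvRank, List.append_assoc]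
      · simp [List.set, List.getD, ih, List.filter_cons, pvRank, h0, h1, h2, h3, h4, List.append_assoc]

-- content of a preferred bucket: at most the one preferred name, if it occurs unseen
theorem DS_filter_eq (cs : List String) : ∀ (t : PySem.Set String) (p : String),
    (pvDS cs t).filter (fun c => c == p) =
      if p ∈ cs ∧ p ∉ t then [p] else [] := by
  induction cs with
  | nil => intro t p; simp [pvDS]
  | cons c cs ih =>
    intro t p
    by_cases h : c ∈ t
    · rw [pvDS, if_pos (by simpa [List.contains_eq_mem] using h), ih]
      by_cases hpc : p = c
      · subst hpc; simp [h]
      · simp [hpc]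
    · rw [pvDS, if_neg (by simpa [List.contains_eq_mem] using h)]
      by_cases hpc : p = c
      · subst hpc
        simp [List.filter_cons, ih, PySem.Set.mem_add, h]
      · simp [List.filter_cons, ih, PySem.Set.mem_add, hpc, Ne.symm hpc]

-- A's appended tail = the non-preferred first occurrences, whenever the seed list s
-- already holds every preferred name of cs and agrees with the seen set t off preferred
theorem newA_eq_DS_filter (cs : List String) :
    ∀ (s : List String) (t : PySem.Set String),
    (∀ c ∈ cs, c ∈ pvPreferred → c ∈ s) →
    (∀ c : String, c ∉ pvPreferred → s.contains c = t.contains c) →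
    pvNewA cs s = (pvDS cs t).filter (fun c => !pvPreferred.contains c) := by
  induction cs with
  | nil => intro s t _ _; simp [pvNewA, pvDS]
  | cons c cs ih =>
    intro s t h1 h2
    by_cases hp : c ∈ pvPreferred
    · have hcs : s.contains c = true := by
        simp [List.contains_eq_mem]; exact h1 c (by simp) hp
      rw [pvNewA, if_pos hcs, pvDS]
      by_cases ht : t.contains c
      · rw [if_pos ht]
        exact ih s t (fun x hx => h1 x (by simp [hx])) h2
      · rw [if_neg ht, List.filter_cons]
        have : pvPreferred.contains c = true := by simp [List.contains_eq_mem, hp]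
        simp only [this, Bool.not_true, Bool.false_eq_true, if_false]
        refine ih s (t.add c) (fun x hx => h1 x (by simp [hx])) ?_
        intro x hx
        have hxc : x ≠ c := fun hh => hx (hh ▸ hp)
        rw [h2 x hx]
        simp [List.contains_eq_mem, PySem.Set.mem_add, hxc]
    · have hnp : pvPreferred.contains c = false := by
        simp [List.contains_eq_mem]; exact hp
      have hst : s.contains c = t.contains c := h2 c hp
      by_cases ht : t.contains c
      · rw [pvNewA, if_pos (hst.trans ht), pvDS, if_pos ht]
        exact ih s t (fun x hx => h1 x (by simp [hx])) h2
      · have hsf : ¬ s.contains c = true := by rw [hst]; exact ht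
        rw [pvNewA, if_neg hsf, pvDS, if_neg ht, List.filter_cons]
        simp only [hnp, Bool.not_false, if_true]
        congr 1
        refine ih (s ++ [c]) (t.add c) (fun x hx hxp => by simp [h1 x (by simp [hx]) hxp]) ?_
        intro x hx
        have hthis := h2 x hx
        simp only [List.contains_eq_mem, PySem.Set.contains_eq_decide, decide_eq_decide] at hthis ⊢
        simp only [List.mem_append, List.mem_singleton, PySem.Set.mem_add]
        rw [hthis]

-- for i < 5, "pvRank c = i" is "c = preferred[i]"
theorem filter_rank0 (l : List String) : l.filter (fun c => pvRank c == 0) = l.filter (fun c => c == "pokeapi_id") := by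
  apply List.filter_congr; intro x _; unfold pvRank; split_ifs <;> simp_all
theorem filter_rank1 (l : List String) : l.filter (fun c => pvRank c == 1) = l.filter (fun c => c == "name") := by
  apply List.filter_congr; intro x _; unfold pvRank; split_ifs <;> simp_all
theorem filter_rank2 (l : List String) : l.filter (fun c => pvRank c == 2) = l.filter (fun c => c == "image_url") := by
  apply List.filter_congr; intro x _; unfold pvRank; split_ifs <;> simp_all
theorem filter_rank3 (l : List String) : l.filter (fun c => pvRank c == 3) = l.filter (fun c => c == "types") := by
  apply List.filter_congr; intro x _; unfold pvRank; split_ifs <;> simp_all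
theorem filter_rank4 (l : List String) : l.filter (fun c => pvRank c == 4) = l.filter (fun c => c == "Moveset") := by
  apply List.filter_congr; intro x _; unfold pvRank; split_ifs <;> simp_all
theorem filter_rank5 (l : List String) : l.filter (fun c => pvRank c == 5) = l.filter (fun c => !pvPreferred.contains c) := by
  apply List.filter_congr; intro x _; unfold pvRank pvPreferred
  split_ifs <;> simp_all [List.contains_eq_mem]

-- ===== VERDICT (by name: the statement is the Claim_ definition above) =====
theorem ledger_column_order_spec : Claim_equal_ledger_column_order := by
  intro columns _
  unfold Spec_ledger_column_order ledger_column_order ledger_column_order_alt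
  simp only []
  -- A's first loop is a filter of the preferred list
  rw [show (fun (ordered : List String) p =>
        if (PySem.Set.ofList columns).contains p then ordered ++ [p] else ordered) =
      (fun (acc : List String) x =>
        if (fun p => (PySem.Set.ofList columns).contains p) x then acc ++ [(fun (y : String) => y) x] else acc) from rfl,
    PySem.List.foldl_append_if]
  rw [A_loop, show List.replicate (pvPreferred.length + 1) ([] : List String) =
      [[], [], [], [], [], []] from rfl, B_loop]
  have hset : ∀ p : String, (PySem.Set.ofList columns).contains p = columns.contains p := by
    intro p; simp [List.contains_eq_mem, PySem.Set.mem_ofList]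
  have hord : (pvPreferred.filter (fun p => (PySem.Set.ofList columns).contains p)).map (fun y => y)
      = pvPreferred.filter (fun p => columns.contains p) := by
    simp only [List.map_id_fun', id]
    apply List.filter_congr; intro x _; exact hset x
  rw [hord]
  set ord := pvPreferred.filter (fun p => columns.contains p) with hord_def
  have hempty : ∀ x : String, (PySem.Set.ofList ([] : List String)).contains x = false := by
    intro x; simp [PySem.Set.ofList, List.contains_eq_mem]
  -- the non-preferred tail
  have htail : pvNewA columns ord =
      (pvDS columns (PySem.Set.ofList [])).filter (fun c => !pvPreferred.contains c) := by
    apply newA_eq_DS_filter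
    · intro c hc hcp
      rw [hord_def]
      simp only [List.mem_filter, List.contains_eq_mem]
      exact ⟨hcp, by simpa using hc⟩
    · intro c hcp
      rw [hempty c, hord_def, List.contains_eq_mem]
      simp only [decide_eq_false_iff_not, List.mem_filter]
      exact fun h => hcp h.1
  -- the preferred buckets
  have hb : ∀ p : String, (pvDS columns (PySem.Set.ofList [])).filter (fun c => c == p)
      = if p ∈ columns then [p] else [] := by
    intro p
    rw [DS_filter_eq]
    by_cases h : p ∈ columns <;> simp [h, PySem.Set.ofList]
  rw [List.flatten, List.flatten, List.flatten, List.flatten, List.flatten, List.flatten, List.flatten]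
  simp only [List.nil_append, List.append_nil]
  rw [filter_rank0, filter_rank1, filter_rank2, filter_rank3, filter_rank4, filter_rank5,
    hb, hb, hb, hb, hb, htail]
  rw [hord_def]
  unfold pvPreferred
  simp only [List.filter_cons, List.filter_nil, List.contains_eq_mem]
  by_cases h0 : "pokeapi_id" ∈ columns <;> by_cases h1 : "name" ∈ columns <;>
    by_cases h2 : "image_url" ∈ columns <;> by_cases h3 : "types" ∈ columns <;>
    by_cases h4 : "Moveset" ∈ columns <;> simp [h0, h1, h2, h3, h4]
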